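-- pv_equiv track=rewrite | github.com/bmuralid/Pure-Fortran | fortran_scan.py | _break_candidates_for_wrap
-- ===== SOURCE A (Python) =====
-- from typing import Dict, Iterable, List, Optional, Set, Tuple
--
-- def _break_candidates_for_wrap(body: str, start: int, end: int) -> List[int]:
--     """Safe split points outside quoted strings."""
--     out: List[int] = []
--     in_single = False
--     in_double = False
--     i = 0
--     while i < len(body):
--         ch = body[i]
--         if ch == "'" and not in_double:
--             if in_single and i + 1 < len(body) and body[i + 1] == "'":
--                 i += 2
--                 continue
--             in_single = not in_single
--             i += 1
--             continue
--         if ch == '"' and not in_single: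
--             if in_double and i + 1 < len(body) and body[i + 1] == '"':
--                 i += 2
--                 continue
--             in_double = not in_double
--             i += 1
--             continue
--         if not in_single and not in_double and start <= i <= end:
--             if ch == "*":
--                 # Never split inside exponentiation token `**`.
--                 if (i > 0 and body[i - 1] == "*") or (i + 1 < len(body) and body[i + 1] == "*"):
--                     i += 1
--                     continue
--             if ch == "/":
--                 # Never split inside string-concatenation token `//`.
--                 if (i > 0 and body[i - 1] == "/") or (i + 1 < len(body) and body[i + 1] == "/"):
--                     i += 1
--                     continue
--             if ch in "+-":
--                 # Never split between exponent marker and signed exponent,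
--                 # e.g. "1.23e-06_dp" or "1.0D+3".
--                 j = i - 1
--                 while j >= 0 and body[j].isspace():
--                     j -= 1
--                 if j >= 0 and body[j] in "eEdD":
--                     k = j - 1
--                     while k >= 0 and body[k].isspace():
--                         k -= 1
--                     if k >= 0 and (body[k].isdigit() or body[k] == "."):
--                         i += 1
--                         continue
--             if ch.isspace() or ch in ",+-*/)=]":
--                 out.append(i)
--         i += 1
--     return out
-- ===== SOURCE B (Python) =====
-- from typing import List
--
--
-- def _outside_string_indices(body: str) -> List[int]:
--     """Indices of characters outside quoted strings (quote chars excluded),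
--     honoring Fortran's doubled-quote escape."""
--     out: List[int] = []
--     quote = None  # the active quote character, if any
--     i = 0
--     n = len(body)
--     while i < n:
--         ch = body[i]
--         if quote is None:
--             if ch in "'\"":
--                 quote = ch
--             else:
--                 out.append(i)
--             i += 1
--         elif ch == quote:
--             if body[i + 1:i + 2] == quote:
--                 i += 2  # doubled quote: stay inside the string
--             else:
--                 quote = None
--                 i += 1
--         else:
--             i += 1
--     return out
--
--
-- def _prev_nonspace(body: str, bound: int) -> int:
--     """Largest index < bound whose character is not whitespace, or -1."""
--     j = bound - 1
--     while j >= 0 and body[j].isspace():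
--         j -= 1
--     return j
--
--
-- def _is_break_point(body: str, i: int) -> bool:
--     ch = body[i]
--     if ch == "*" and ((i > 0 and body[i - 1] == "*")
--                       or (i + 1 < len(body) and body[i + 1] == "*")):
--         return False  # inside `**`
--     if ch == "/" and ((i > 0 and body[i - 1] == "/")
--                       or (i + 1 < len(body) and body[i + 1] == "/")):
--         return False  # inside `//`
--     if ch in "+-":
--         j = _prev_nonspace(body, i)
--         if j >= 0 and body[j] in "eEdD":
--             k = _prev_nonspace(body, j)
--             if k >= 0 and (body[k].isdigit() or body[k] == "."):
--                 return False  # sign of an exponent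
--     return ch.isspace() or ch in ",+-*/)=]"
--
--
-- def _break_candidates_for_wrap(body: str, start: int, end: int) -> List[int]:
--     """Safe split points outside quoted strings."""
--     return [i for i in _outside_string_indices(body)
--             if start <= i <= end and _is_break_point(body, i)]
-- ===== Notes on version B (the rewrite author's own statement) =====
-- stated objective: alternative
-- what changed: A interleaves quote tracking and break-point tests in one stateful loop; B decomposes it into a quote-scan pass that lists the indices outside quoted strings, followed by a pure per-index break-point predicate applied as a filter.
import Mathlib
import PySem

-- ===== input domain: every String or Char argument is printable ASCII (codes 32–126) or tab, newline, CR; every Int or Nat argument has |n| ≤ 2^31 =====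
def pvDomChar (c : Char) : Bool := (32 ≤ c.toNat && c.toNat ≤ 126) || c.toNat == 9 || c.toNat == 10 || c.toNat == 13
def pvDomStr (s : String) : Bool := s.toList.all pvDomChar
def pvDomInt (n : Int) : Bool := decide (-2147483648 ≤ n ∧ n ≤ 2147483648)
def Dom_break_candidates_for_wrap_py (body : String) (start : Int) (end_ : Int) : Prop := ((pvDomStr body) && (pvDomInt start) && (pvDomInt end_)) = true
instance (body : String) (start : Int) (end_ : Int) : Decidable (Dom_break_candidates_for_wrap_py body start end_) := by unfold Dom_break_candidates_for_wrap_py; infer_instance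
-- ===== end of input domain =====

-- B splits A's single stateful loop into two passes: a quote-state scan that lists the
-- indices outside quoted strings, then a pure per-index break-point filter (objective:
-- alternative decomposition, same cost).

-- ===== PORT A =====

-- A's inner backward while loop `j = i - 1; while j >= 0 and body[j].isspace(): j -= 1`
-- (returns none for Python's -1).
def pvA_back (cs : List Char) : Nat → Option Nat
  | 0 => none
  | j+1 => if PySem.Chars.isspace (cs.getD j ' ') then pvA_back cs j else some j

-- A's exponent-sign guard: the two nested backward scans and their checks.
def pvA_expGuard (cs : List Char) (i : Nat) : Bool :=
  match pvA_back cs i with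
  | none => false
  | some j =>
    if ['e','E','d','D'].contains (cs.getD j ' ') then
      match pvA_back cs j with
      | none => false
      | some k => PySem.Chars.isdigit (cs.getD k ' ') || cs.getD k ' ' == '.'
    else false

-- A's main while loop, step for step (state: i, in_single, in_double, out).
-- fuel is termination bookkeeping only: each iteration advances i by at least 1,
-- so fuel = cs.length at i = 0 never runs out before the `i < len` test fails.
def pvA_loop (cs : List Char) (start end_ : Int) :
    Nat → Nat → Bool → Bool → List Int → List Int
  | 0, _, _, _, out => out
  | fuel+1, i, in_s, in_d, out =>
    if i < cs.length then
      if cs.getD i ' ' == '\'' && !in_d then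
        if in_s && decide (i+1 < cs.length) && (cs.getD (i+1) ' ' == '\'') then
          pvA_loop cs start end_ fuel (i+2) in_s in_d out
        else pvA_loop cs start end_ fuel (i+1) (!in_s) in_d out
      else if cs.getD i ' ' == '"' && !in_s then
        if in_d && decide (i+1 < cs.length) && (cs.getD (i+1) ' ' == '"') then
          pvA_loop cs start end_ fuel (i+2) in_s in_d out
        else pvA_loop cs start end_ fuel (i+1) in_s (!in_d) out
      else if !in_s && !in_d && decide (start ≤ (i:Int) ∧ (i:Int) ≤ end_) then
        if cs.getD i ' ' == '*' && ((decide (0 < i) && (cs.getD (i-1) ' ' == '*'))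
            || (decide (i+1 < cs.length) && (cs.getD (i+1) ' ' == '*'))) then
          pvA_loop cs start end_ fuel (i+1) in_s in_d out
        else if cs.getD i ' ' == '/' && ((decide (0 < i) && (cs.getD (i-1) ' ' == '/'))
            || (decide (i+1 < cs.length) && (cs.getD (i+1) ' ' == '/'))) then
          pvA_loop cs start end_ fuel (i+1) in_s in_d out
        else if (cs.getD i ' ' == '+' || cs.getD i ' ' == '-') && pvA_expGuard cs i then
          pvA_loop cs start end_ fuel (i+1) in_s in_d out
        else if PySem.Chars.isspace (cs.getD i ' ')
            || [',','+','-','*','/',')','=',']'].contains (cs.getD i ' ') then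
          pvA_loop cs start end_ fuel (i+1) in_s in_d (out ++ [(i:Int)])
        else pvA_loop cs start end_ fuel (i+1) in_s in_d out
      else pvA_loop cs start end_ fuel (i+1) in_s in_d out
    else out

def break_candidates_for_wrap_py (body : String) (start : Int) (end_ : Int) : List Int :=
  pvA_loop body.toList start end_ body.toList.length 0 false false []

-- ===== PORT B =====

-- B's `_outside_string_indices`: quote scan tracking the active quote character.
-- `(cs.drop (i+1)).take 1 == [qc]` is Python's `body[i+1:i+2] == quote` (index ≥ 0).
-- fuel is termination bookkeeping only, as in pvA_loop.
def pvB_scan (cs : List Char) : Nat → Nat → Option Char → List Nat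
  | 0, _, _ => []
  | fuel+1, i, q =>
    if i < cs.length then
      match q with
      | none =>
        if ['\'','"'].contains (cs.getD i ' ') then
          pvB_scan cs fuel (i+1) (some (cs.getD i ' '))
        else i :: pvB_scan cs fuel (i+1) none
      | some qc =>
        if cs.getD i ' ' == qc then
          if (cs.drop (i+1)).take 1 == [qc] then pvB_scan cs fuel (i+2) (some qc)
          else pvB_scan cs fuel (i+1) none
        else pvB_scan cs fuel (i+1) (some qc)
    else []

-- B's `_prev_nonspace` (none for Python's -1).
def pvB_prevNonspace (cs : List Char) : Nat → Option Nat
  | 0 => none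
  | j+1 => if PySem.Chars.isspace (cs.getD j ' ') then pvB_prevNonspace cs j else some j

-- B's exponent-sign test used inside `_is_break_point`.
def pvB_expSign (cs : List Char) (i : Nat) : Bool :=
  match pvB_prevNonspace cs i with
  | none => false
  | some j =>
    if ['e','E','d','D'].contains (cs.getD j ' ') then
      match pvB_prevNonspace cs j with
      | none => false
      | some k => PySem.Chars.isdigit (cs.getD k ' ') || cs.getD k ' ' == '.'
    else false

-- B's `_is_break_point`: a pure predicate on a raw-body index.
def pvB_isBreak (cs : List Char) (i : Nat) : Bool :=
  if cs.getD i ' ' == '*' && ((decide (0 < i) && (cs.getD (i-1) ' ' == '*'))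
      || (decide (i+1 < cs.length) && (cs.getD (i+1) ' ' == '*'))) then false
  else if cs.getD i ' ' == '/' && ((decide (0 < i) && (cs.getD (i-1) ' ' == '/'))
      || (decide (i+1 < cs.length) && (cs.getD (i+1) ' ' == '/'))) then false
  else if (cs.getD i ' ' == '+' || cs.getD i ' ' == '-') && pvB_expSign cs i then false
  else PySem.Chars.isspace (cs.getD i ' ') || [',','+','-','*','/',')','=',']'].contains (cs.getD i ' ')

def break_candidates_for_wrap_py_alt (body : String) (start : Int) (end_ : Int) : List Int :=
  ((pvB_scan body.toList body.toList.length 0 none).filter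
      (fun (j : Nat) => decide (start ≤ (j:Int) ∧ (j:Int) ≤ end_) && pvB_isBreak body.toList j)).map
    (fun (j : Nat) => (j : Int))

-- ===== PRECONDITION & SPEC =====
def Spec_break_candidates_for_wrap_py (body : String) (start : Int) (end_ : Int) (out : List Int) : Prop := out = break_candidates_for_wrap_py_alt body start end_
instance (body : String) (start : Int) (end_ : Int) (out : List Int) : Decidable (Spec_break_candidates_for_wrap_py body start end_ out) := by unfold Spec_break_candidates_for_wrap_py; infer_instance

-- ===== CLAIM (what is proved, stated in full; the proofs are below) =====
def Claim_equal_break_candidates_for_wrap_py : Prop := ∀ (body : String) (start : Int) (end_ : Int), Dom_break_candidates_for_wrap_py body start end_ → Spec_break_candidates_for_wrap_py body start end_ (break_candidates_for_wrap_py body start end_)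

-- ===== LEMMAS AND PROOFS =====

theorem pvBack_eq (cs : List Char) : ∀ n, pvA_back cs n = pvB_prevNonspace cs n := by
  intro n
  induction n with
  | zero => rfl
  | succ j ih => simp [pvA_back, pvB_prevNonspace, ih]

theorem pvExp_eq (cs : List Char) (i : Nat) : pvA_expGuard cs i = pvB_expSign cs i := by
  simp [pvA_expGuard, pvB_expSign, pvBack_eq]

-- B's one-character-slice comparison equals A's bounds-checked next-character test.
theorem pvSlice_eq (cs : List Char) (i : Nat) (qc : Char) :
    ((cs.drop (i+1)).take 1 == [qc]) = (decide (i+1 < cs.length) && (cs.getD (i+1) ' ' == qc)) := by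
  by_cases h : i+1 < cs.length
  · have hd : cs.drop (i+1) = cs[i+1] :: cs.drop (i+2) := List.drop_eq_getElem_cons h
    have hg : cs.getD (i+1) ' ' = cs[i+1] := List.getD_eq_getElem cs ' ' h
    simp only [hg, h, decide_true, Bool.true_and]
    rw [hd, List.take_succ_cons, List.take_zero]
    simp only [List.cons_beq_cons]; simp
  · have hd : cs.drop (i+1) = [] := List.drop_eq_nil_of_le (by omega)
    simp [hd, h]

-- A's four sequential candidate guards collapse to B's pure predicate.
theorem pvCand (cs : List Char) (i : Nat) {α : Type} (X Y : α) :
    (if cs.getD i ' ' == '*' && ((decide (0 < i) && (cs.getD (i-1) ' ' == '*'))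
        || (decide (i+1 < cs.length) && (cs.getD (i+1) ' ' == '*'))) then X
     else if cs.getD i ' ' == '/' && ((decide (0 < i) && (cs.getD (i-1) ' ' == '/'))
        || (decide (i+1 < cs.length) && (cs.getD (i+1) ' ' == '/'))) then X
     else if (cs.getD i ' ' == '+' || cs.getD i ' ' == '-') && pvA_expGuard cs i then X
     else if PySem.Chars.isspace (cs.getD i ' ')
        || [',','+','-','*','/',')','=',']'].contains (cs.getD i ' ') then Y
     else X)
    = if pvB_isBreak cs i then Y else X := by
  unfold pvB_isBreak
  rw [pvExp_eq]
  split_ifs <;> simp_all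

-- A's (in_single, in_double) state corresponds to B's active-quote character.
def pvQ (in_s in_d : Bool) : Option Char :=
  if in_s then some '\'' else if in_d then some '"' else none

theorem pvLoop_eq (cs : List Char) (start end_ : Int) :
    ∀ fuel i in_s in_d out, (in_s && in_d) = false →
      pvA_loop cs start end_ fuel i in_s in_d out
        = out ++ ((pvB_scan cs fuel i (pvQ in_s in_d)).filter
            (fun (j : Nat) => decide (start ≤ (j:Int) ∧ (j:Int) ≤ end_) && pvB_isBreak cs j)).map
          (fun (j : Nat) => (j : Int)) := by
  intro fuel
  induction fuel with
  | zero => intro i in_s in_d out _; simp [pvA_loop, pvB_scan]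
  | succ f ih =>
    intro i in_s in_d out hsd
    by_cases hi : i < cs.length
    · cases in_s with
      | false =>
        cases in_d with
        | false =>
          -- outside any string: pvQ = none
          simp only [pvA_loop, pvB_scan, pvQ, hi, if_true, Bool.not_false, Bool.and_true,
            Bool.true_and]
          by_cases h1 : (cs.getD i ' ' == '\'') = true
          · have hch : cs.getD i ' ' = '\'' := by simpa using h1
            simp only [hch, List.contains_cons, BEq.rfl, Bool.true_or, if_true,
              Bool.false_and, Bool.false_eq_true, if_false]
            have := ih (i+1) true false out (by simp)
            simpa [pvQ] using this
          · simp only [Bool.not_eq_true] at h1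
            simp only [h1, Bool.false_eq_true, if_false]
            by_cases h2 : (cs.getD i ' ' == '"') = true
            · have hch : cs.getD i ' ' = '"' := by simpa using h2
              simp only [hch, List.contains_cons, List.contains_nil, BEq.rfl, if_true]
              have := ih (i+1) false true out (by simp)
              simpa [pvQ] using this
            · simp only [Bool.not_eq_true] at h2
              have hcont : ([ '\'', '"'].contains (cs.getD i ' ')) = false := by
                simp only [List.contains_cons, List.contains_nil, Bool.or_false]
                rw [h1, h2]; rfl
              simp only [h2, hcont, Bool.false_eq_true, if_false, List.filter_cons]
              by_cases c6 : (decide (start ≤ (i:Int) ∧ (i:Int) ≤ end_)) = true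
              · simp only [c6, Bool.true_and, if_true]
                rw [pvCand]
                by_cases g : pvB_isBreak cs i = true
                · simp only [g, if_true, List.map_cons]
                  rw [ih (i+1) false false (out ++ [(i:Int)]) (by simp)]
                  simp only [pvQ, if_false, Bool.false_eq_true, List.append_assoc,
                    List.singleton_append]
                · simp only [Bool.not_eq_true] at g
                  simp only [g, Bool.false_eq_true, if_false]
                  simpa [pvQ] using ih (i+1) false false out (by simp)
              · simp only [Bool.not_eq_true] at c6
                simp only [c6, Bool.false_and, Bool.false_eq_true, if_false]
                simpa [pvQ] using ih (i+1) false false out (by simp)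
        | true =>
          -- inside a double-quoted string: pvQ = some '"'
          simp only [pvA_loop, pvB_scan, pvQ, hi, if_true, Bool.not_true, Bool.and_false,
            Bool.false_eq_true, if_false, Bool.true_and, Bool.false_and, Bool.not_false]
          by_cases h2 : (cs.getD i ' ' == '"') = true
          · simp only [h2, Bool.true_and, if_true, pvSlice_eq]
            by_cases hesc : (decide (i+1 < cs.length) && (cs.getD (i+1) ' ' == '"')) = true
            · simp only [hesc, if_true]
              simpa [pvQ] using ih (i+2) false true out (by simp)
            · simp only [Bool.not_eq_true] at hesc
              simp only [hesc, Bool.false_eq_true, if_false]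
              simpa [pvQ] using ih (i+1) false false out (by simp)
          · simp only [Bool.not_eq_true] at h2
            simp only [h2, Bool.false_and, Bool.false_eq_true, if_false]
            simpa [pvQ] using ih (i+1) false true out (by simp)
      | true =>
        -- inside a single-quoted string (in_d = false by hsd): pvQ = some '\''
        cases in_d with
        | true => simp at hsd
        | false =>
          simp only [pvA_loop, pvB_scan, pvQ, hi, if_true, Bool.not_false, Bool.and_true,
            Bool.true_and, Bool.not_true, Bool.false_and, Bool.and_false, Bool.false_eq_true,
            if_false]
          by_cases h1 : (cs.getD i ' ' == '\'') = true
          · simp only [h1, if_true, pvSlice_eq]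
            by_cases hesc : (decide (i+1 < cs.length) && (cs.getD (i+1) ' ' == '\'')) = true
            · simp only [hesc, if_true]
              simpa [pvQ] using ih (i+2) true false out (by simp)
            · simp only [Bool.not_eq_true] at hesc
              simp only [hesc, Bool.false_eq_true, if_false]
              simpa [pvQ] using ih (i+1) false false out (by simp)
          · simp only [Bool.not_eq_true] at h1
            simp only [h1, Bool.false_eq_true, if_false]
            simpa [pvQ] using ih (i+1) true false out (by simp)
    · simp [pvA_loop, pvB_scan, hi]

-- ===== VERDICT (by name: the statement is the Claim_ definition above) =====
theorem break_candidates_for_wrap_py_spec : Claim_equal_break_candidates_for_wrap_py := by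
  intro body start end_ _hdom
  unfold Spec_break_candidates_for_wrap_py break_candidates_for_wrap_py break_candidates_for_wrap_py_alt
  simpa [pvQ] using pvLoop_eq body.toList start end_ body.toList.length 0 false false [] (by simp)
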